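-- pv_equiv track=rewrite | github.com/Digitzaki/RxD_Editor | datainspect/pattern_scan.py | _cluster_pointers
-- ===== SOURCE A (Python) =====
-- def _cluster_pointers(pointers, max_gap: int = 16):
--     """
--     Group nearby pointers into clusters to identify pointer tables.
--
--     Pointer tables are common in binary formats - sequences of file offsets
--     that point to data structures. We detect them by finding groups of 3+
--     valid pointers within a small range (max_gap bytes apart).
--     """
--     if not pointers:
--         return []
--
--     # Sort pointers by offset
--     sorted_pointers = sorted(pointers, key=lambda x: x[0])
--
--     # Start first cluster
--     clusters = [[sorted_pointers[0]]]
--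
--     # Group pointers that are close together
--     for ptr in sorted_pointers[1:]:
--         # If this pointer is within max_gap of the last pointer in current cluster, add it
--         if ptr[0] - clusters[-1][-1][0] <= max_gap:
--             clusters[-1].append(ptr)
--         else:
--             # Too far away, start a new cluster
--             clusters.append([ptr])
--
--     # Only return clusters with at least 3 pointers (likely pointer tables)
--     return [c for c in clusters if len(c) >= 3]
-- ===== SOURCE B (Python) =====
-- def _cluster_pointers(pointers, max_gap: int = 16):
--     if not pointers:
--         return []
--     # Boundaries-then-slices decomposition: repeatedly measure the length of the
--     # next maximal run of adjacent sorted pointers (gap <= max_gap), slice it off.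
--     rest = sorted(pointers, key=lambda x: x[0])
--     groups = []
--     while rest:
--         i = 1
--         while i < len(rest) and rest[i][0] - rest[i - 1][0] <= max_gap:
--             i += 1
--         groups.append(rest[:i])
--         rest = rest[i:]
--     return [g for g in groups if len(g) >= 3]
-- ===== Notes on version B (the rewrite author's own statement) =====
-- stated objective: alternative
-- what changed: Replaces A's incremental append-to-last-cluster fold with a two-phase boundaries-then-slices decomposition: repeatedly measure the length of the next maximal run of adjacent sorted pointers (gap <= max_gap) and slice it off whole.
import Mathlib
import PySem

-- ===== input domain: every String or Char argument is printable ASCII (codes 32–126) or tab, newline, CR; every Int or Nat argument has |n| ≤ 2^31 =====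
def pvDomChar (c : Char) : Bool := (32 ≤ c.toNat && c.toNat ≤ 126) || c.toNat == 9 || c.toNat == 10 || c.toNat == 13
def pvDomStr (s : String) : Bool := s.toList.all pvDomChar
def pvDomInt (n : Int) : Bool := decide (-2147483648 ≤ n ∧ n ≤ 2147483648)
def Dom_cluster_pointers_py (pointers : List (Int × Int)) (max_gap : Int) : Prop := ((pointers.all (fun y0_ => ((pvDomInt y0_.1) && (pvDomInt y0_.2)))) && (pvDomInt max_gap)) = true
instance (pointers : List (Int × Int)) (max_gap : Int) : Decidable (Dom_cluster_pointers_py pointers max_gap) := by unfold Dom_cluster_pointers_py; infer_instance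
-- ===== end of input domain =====

-- B replaces A's incremental append-to-last-cluster loop by a boundaries-then-slices
-- decomposition (measure the next maximal run, slice it off); objective: alternative, same cost.

-- ===== PORT A =====
def cluster_pointers_py (pointers : List (Int × Int)) (max_gap : Int) : List (List (Int × Int)) :=
  if pointers = [] then []
  else
    let sorted_pointers := PySem.List.sorted pointers (fun x => x.1)
    let clusters :=
      (PySem.List.slice sorted_pointers (some 1) none).foldl
        (fun clusters ptr =>
          if ptr.1 - (PySem.List.pyGetD (PySem.List.pyGetD clusters (-1) []) (-1) (0, 0)).1 ≤ max_gap then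
            -- clusters[-1].append(ptr)
            clusters.dropLast ++ [PySem.List.pyGetD clusters (-1) [] ++ [ptr]]
          else
            clusters ++ [[ptr]])
        [[PySem.List.pyGetD sorted_pointers 0 (0, 0)]]
    clusters.filter (fun c => decide (3 ≤ c.length))

-- ===== PORT B =====
-- inner while loop of Source B: advance i while rest[i] is within max_gap of rest[i-1]
def runLenB (max_gap : Int) (rest : List (Int × Int)) (i : Nat) : Nat :=
  if h : i < rest.length ∧
      (PySem.List.pyGetD rest (i : Int) (0, 0)).1 -
        (PySem.List.pyGetD rest ((i : Int) - 1) (0, 0)).1 ≤ max_gap then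
    runLenB max_gap rest (i + 1)
  else i
termination_by rest.length - i
decreasing_by omega

-- i ≤ runLenB max_gap rest i (the inner loop only moves forward); used for termination below
theorem runLenB_ge (max_gap : Int) (rest : List (Int × Int)) (i : Nat) :
    i ≤ runLenB max_gap rest i := by
  unfold runLenB
  split
  · exact le_trans (Nat.le_succ i) (runLenB_ge max_gap rest (i + 1))
  · exact le_refl i
termination_by rest.length - i
decreasing_by
  rename_i h
  omega

-- outer while loop of Source B: slice off the next run, recurse on the remainder
def sliceLoopB (max_gap : Int) (rest : List (Int × Int)) : List (List (Int × Int)) :=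
  if _hr : rest = [] then []
  else
    let i := runLenB max_gap rest 1
    PySem.List.slice rest none (some (i : Int)) ::
      sliceLoopB max_gap (PySem.List.slice rest (some (i : Int)) none)
termination_by rest.length
decreasing_by
  have h1 : 1 ≤ runLenB max_gap rest 1 := runLenB_ge max_gap rest 1
  rw [PySem.List.slice_from_natCast]
  simp only [List.length_drop]
  cases rest with
  | nil => exact absurd rfl _hr
  | cons a t => simp; omega

def cluster_pointers_py_alt (pointers : List (Int × Int)) (max_gap : Int) : List (List (Int × Int)) :=
  if pointers = [] then []
  else
    (sliceLoopB max_gap (PySem.List.sorted pointers (fun x => x.1))).filter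
      (fun g => decide (3 ≤ g.length))

-- ===== PRECONDITION & SPEC =====
def Spec_cluster_pointers_py (pointers : List (Int × Int)) (max_gap : Int) (out : List (List (Int × Int))) : Prop := out = cluster_pointers_py_alt pointers max_gap
instance (pointers : List (Int × Int)) (max_gap : Int) (out : List (List (Int × Int))) : Decidable (Spec_cluster_pointers_py pointers max_gap out) := by unfold Spec_cluster_pointers_py; infer_instance

-- ===== CLAIM (what is proved, stated in full; the proofs are below) =====
def Claim_equal_cluster_pointers_py : Prop := ∀ (pointers : List (Int × Int)) (max_gap : Int), Dom_cluster_pointers_py pointers max_gap → Spec_cluster_pointers_py pointers max_gap (cluster_pointers_py pointers max_gap)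

-- ===== LEMMAS AND PROOFS =====

-- Reference form: group a nonempty list (head x, tail t) at adjacent gaps > max_gap.
def chunk (g : Int) : (Int × Int) → List (Int × Int) → List (List (Int × Int))
  | x, [] => [[x]]
  | x, y :: t =>
    if y.1 - x.1 ≤ g then
      match chunk g y t with
      | [] => [[x]]
      | c :: cs => (x :: c) :: cs
    else [x] :: chunk g y t

theorem chunk_shape (g : Int) (t : List (Int × Int)) (x : Int × Int) :
    ∃ s cs, chunk g x t = (x :: s) :: cs := by
  induction t generalizing x with
  | nil => exact ⟨[], [], rfl⟩
  | cons y t ih =>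
    obtain ⟨s, cs, hy⟩ := ih y
    by_cases hg : y.1 - x.1 ≤ g
    · exact ⟨y :: s, cs, by simp [chunk, hg, hy]⟩
    · exact ⟨[], chunk g y t, by simp [chunk, hg]⟩

-- join a pending prefix c onto the first group
def mergeF (c : List (Int × Int)) : List (List (Int × Int)) → List (List (Int × Int))
  | [] => [c]
  | gp :: gs => (c ++ gp) :: gs

-- A's fold, started with clusters = done ++ [c ++ [x]], computes done ++ mergeF c (chunk g x t)
theorem foldA_eq_chunk (g : Int) (t : List (Int × Int)) (x : Int × Int)
    (done : List (List (Int × Int))) (c : List (Int × Int)) :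
    t.foldl
      (fun clusters ptr =>
        if ptr.1 - (PySem.List.pyGetD (PySem.List.pyGetD clusters (-1) []) (-1) (0, 0)).1 ≤ g then
          clusters.dropLast ++ [PySem.List.pyGetD clusters (-1) [] ++ [ptr]]
        else clusters ++ [[ptr]])
      (done ++ [c ++ [x]]) = done ++ mergeF c (chunk g x t) := by
  induction t generalizing x done c with
  | nil => simp [chunk, mergeF]
  | cons y t ih =>
    simp only [List.foldl_cons, PySem.List.pyGetD_neg_one_append_singleton,
      List.dropLast_concat]
    by_cases hg : y.1 - x.1 ≤ g
    · rw [if_pos hg]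
      have := ih y done (c ++ [x])
      simp only [List.append_assoc] at this ⊢
      rw [this]
      obtain ⟨s, cs, hy⟩ := chunk_shape g t y
      simp [chunk, hg, hy, mergeF]
    · rw [if_neg hg]
      have := ih y (done ++ [c ++ [x]]) []
      simp only [List.nil_append, List.append_assoc] at this ⊢
      rw [this]
      obtain ⟨s, cs, hy⟩ := chunk_shape g t y
      simp [chunk, hg, hy, mergeF]

-- structural run length: how many leading adjacent elements stay within g of their predecessor
def runLenS (g : Int) : (Int × Int) → List (Int × Int) → Nat
  | _, [] => 0
  | x, y :: t => if y.1 - x.1 ≤ g then runLenS g y t + 1 else 0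

theorem runLenS_le (g : Int) (t : List (Int × Int)) (x : Int × Int) :
    runLenS g x t ≤ t.length := by
  induction t generalizing x with
  | nil => simp [runLenS]
  | cons y t ih =>
    simp only [runLenS]
    split
    · simpa using ih y
    · simp

-- B's index loop computes i plus the structural run length of the remainder
theorem runLenB_eq (g : Int) (rest : List (Int × Int)) (i : Nat)
    (h1 : 1 ≤ i) (h2 : i ≤ rest.length) :
    runLenB g rest i = i + runLenS g (rest.getD (i - 1) (0, 0)) (rest.drop i) := by
  rw [runLenB]
  by_cases hi : i < rest.length
  · have hgi : (PySem.List.pyGetD rest (i : Int) (0, 0)) = rest[i] := by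
      rw [PySem.List.pyGetD_eq_getElem rest (0, 0) (by omega) (by exact_mod_cast hi)]
      simp
    have hgi1 : (PySem.List.pyGetD rest ((i : Int) - 1) (0, 0)) = rest[i - 1] := by
      rw [PySem.List.pyGetD_eq_getElem rest (0, 0) (by omega) (by omega)]
      congr 1
      omega
    have hdrop : rest.drop i = rest[i] :: rest.drop (i + 1) := List.drop_eq_getElem_cons hi
    have hgetD : rest.getD (i - 1) (0, 0) = rest[i - 1] := List.getD_eq_getElem rest (0,0) (by omega)
    by_cases hg : (rest[i]).1 - (rest[i - 1]).1 ≤ g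
    · rw [dif_pos ⟨hi, by rw [hgi, hgi1]; exact hg⟩]
      rw [runLenB_eq g rest (i + 1) (by omega) (by omega)]
      have : rest.getD (i + 1 - 1) (0, 0) = rest[i] := List.getD_eq_getElem rest (0,0) (by omega)
      rw [this, hgetD, hdrop]
      simp only [runLenS, hg, if_pos]
      omega
    · rw [dif_neg (by rw [hgi, hgi1]; tauto)]
      rw [hgetD, hdrop]
      simp [runLenS, hg]
  · have : i = rest.length := by omega
    rw [dif_neg (by omega)]
    simp [this, runLenS]
termination_by rest.length - i
decreasing_by omega

-- chunk splits as: first run, then chunk of the remainder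
theorem chunk_split (g : Int) (t : List (Int × Int)) (x : Int × Int) :
    chunk g x t = (x :: t.take (runLenS g x t)) ::
      (match t.drop (runLenS g x t) with
       | [] => []
       | y :: t' => chunk g y t') := by
  induction t generalizing x with
  | nil => simp [chunk, runLenS]
  | cons y t ih =>
    by_cases hg : y.1 - x.1 ≤ g
    · have h1 := ih y
      simp only [chunk, runLenS, hg, if_true, h1, List.take_succ_cons, List.drop_succ_cons]
    · simp [chunk, hg, runLenS]

-- B's outer loop on a nonempty list computes chunk
theorem sliceLoopB_eq_chunk (g : Int) (x : Int × Int) (t : List (Int × Int)) :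
    sliceLoopB g (x :: t) = chunk g x t := by
  rw [sliceLoopB]
  rw [dif_neg (by simp)]
  have hrl : runLenB g (x :: t) 1 = runLenS g x t + 1 := by
    rw [runLenB_eq g (x :: t) 1 (le_refl 1) (by simp)]
    simp only [show (x :: t).getD (1 - 1) (0, 0) = x from rfl, show (x :: t).drop 1 = t from rfl]
    omega
  have hle := runLenS_le g t x
  simp only [hrl]
  rw [PySem.List.slice_to_natCast, PySem.List.slice_from_natCast]
  simp only [List.take_succ_cons, List.drop_succ_cons]
  rw [chunk_split g t x]
  cases hd : t.drop (runLenS g x t) with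
  | nil => simp [sliceLoopB]
  | cons y t' =>
    congr 1
    exact sliceLoopB_eq_chunk g y t'
termination_by (x :: t).length
decreasing_by
  have hlen := congrArg List.length hd
  simp at hlen ⊢
  omega

-- ===== VERDICT (by name: the statement is the Claim_ definition above) =====
theorem cluster_pointers_py_spec : Claim_equal_cluster_pointers_py := by
  intro pointers max_gap _
  unfold Spec_cluster_pointers_py cluster_pointers_py cluster_pointers_py_alt
  by_cases hp : pointers = []
  · simp [hp]
  · rw [if_neg hp, if_neg hp]
    cases hs : PySem.List.sorted pointers (fun x => x.1) with
    | nil => exact absurd ((PySem.List.sorted_eq_nil_iff pointers _ false).mp hs) hp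
    | cons h t =>
      simp only [PySem.List.slice_from_one, List.tail_cons, PySem.List.pyGetD_zero_cons]
      rw [sliceLoopB_eq_chunk max_gap h t]
      have := foldA_eq_chunk max_gap t h [] []
      simp only [List.nil_append] at this
      rw [this]
      obtain ⟨s, cs, hc⟩ := chunk_shape max_gap t h
      rw [hc]
      simp [mergeF]
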